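-- pv_equiv track=rewrite | github.com/nhongming/CodeIT-Archived-Labs | codeitessentialssolutions/pset3/mutuals/mutuals.py | getMutuals
-- ===== SOURCE A (Python) =====
-- def getMutuals(friends, user1, user2):
--     # TO IMPLEMENT
--     if user1 not in friends or user2 not in friends:
--         return []
--     user1_friends = sorted(friends[user1])
--     user2_friends = sorted(friends[user2])
--     count_user1_friends = len(user1_friends)
--     count_user2_friends = len(user2_friends)
--
--     i,j = 0,0
--     mutual_friends = []
--     while i < count_user1_friends and j < count_user2_friends:
--         if user1_friends[i] < user2_friends[j]:
--             i+=1
--         elif user2_friends[j] < user1_friends[i]: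
--             j+=1
--         else:
--             mutual_friends.append(user2_friends[j])
--             j+=1
--             i+=1
--     if len(mutual_friends) != 0:
--         return mutual_friends
--     else:
--         return []
-- ===== SOURCE B (Python) =====
-- def getMutuals(friends, user1, user2):
--     # Multiset-intersection via count dictionaries (no pre-sorting, no two-pointer merge),
--     # then one final sort of the mutuals.
--     if user1 not in friends or user2 not in friends:
--         return []
--     counts2 = {}
--     for f in friends[user2]:
--         counts2[f] = counts2.get(f, 0) + 1
--     counts1 = {}
--     for f in friends[user1]:
--         counts1[f] = counts1.get(f, 0) + 1
--     out = []
--     for f, c in counts1.items():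
--         out.extend([f] * min(c, counts2.get(f, 0)))
--     return sorted(out)
-- ===== Notes on version B (the rewrite author's own statement) =====
-- stated objective: alternative
-- what changed: Replaces A's sort-both-lists-then-two-pointer-merge with a hash-based multiset intersection: count each list into a dict, emit each friend min(count1,count2) times, and sort only the mutuals.
import Mathlib
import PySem

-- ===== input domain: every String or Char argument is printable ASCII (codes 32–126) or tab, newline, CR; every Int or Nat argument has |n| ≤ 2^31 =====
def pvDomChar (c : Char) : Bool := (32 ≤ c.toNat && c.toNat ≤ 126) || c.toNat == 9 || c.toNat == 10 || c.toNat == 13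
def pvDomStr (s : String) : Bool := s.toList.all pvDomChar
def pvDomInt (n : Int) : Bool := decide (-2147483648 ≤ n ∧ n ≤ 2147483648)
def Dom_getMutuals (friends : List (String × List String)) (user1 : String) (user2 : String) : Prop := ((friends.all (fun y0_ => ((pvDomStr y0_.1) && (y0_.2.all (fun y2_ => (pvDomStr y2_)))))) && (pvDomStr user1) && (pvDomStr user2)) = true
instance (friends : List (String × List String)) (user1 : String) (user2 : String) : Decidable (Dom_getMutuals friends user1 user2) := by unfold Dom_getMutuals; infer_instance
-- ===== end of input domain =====

-- B replaces A's sort-both-lists-then-two-pointer-merge with a count-dictionary multiset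
-- intersection, sorting only the mutual friends at the end (alternative algorithm, same result).

-- ===== PORT A =====
-- the two-pointer while loop over the two sorted lists; acc = mutual_friends
def pvMergeLoop : List String → List String → List String → List String
  | x :: xs, y :: ys, acc =>
    if x < y then pvMergeLoop xs (y :: ys) acc
    else if y < x then pvMergeLoop (x :: xs) ys acc
    else pvMergeLoop xs ys (acc ++ [y])
  | _, _, acc => acc
  termination_by xs ys _ => xs.length + ys.length

def getMutuals (friends : List (String × List String)) (user1 : String) (user2 : String) : List String :=
  match friends.lookup user1, friends.lookup user2 with
  | some l1, some l2 =>
    let user1_friends := PySem.List.sorted l1 (fun x => x) false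
    let user2_friends := PySem.List.sorted l2 (fun x => x) false
    let mutual_friends := pvMergeLoop user1_friends user2_friends []
    if mutual_friends.length ≠ 0 then mutual_friends else []
  | _, _ => []

-- ===== PORT B =====
-- the `counts[f] = counts.get(f, 0) + 1` loop of Source B
def pvCounts (l : List String) : PySem.Dict String Int :=
  l.foldl (fun d x => d.insert x (d.getD x 0 + 1)) PySem.Dict.empty

def getMutuals_alt (friends : List (String × List String)) (user1 : String) (user2 : String) : List String :=
  match friends.lookup user1 with
  | none => []
  | some l1 =>
  match friends.lookup user2 with
  | none => []
  | some l2 =>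
    let counts2 := pvCounts l2
    let counts1 := pvCounts l1
    let out := counts1.items.foldl
      (fun acc kv => acc ++ List.replicate (min kv.2 (counts2.getD kv.1 0)).toNat kv.1) []
    PySem.List.sorted out (fun x => x) false

-- ===== PRECONDITION & SPEC =====
def Spec_getMutuals (friends : List (String × List String)) (user1 : String) (user2 : String) (out : List String) : Prop := out = getMutuals_alt friends user1 user2
instance (friends : List (String × List String)) (user1 : String) (user2 : String) (out : List String) : Decidable (Spec_getMutuals friends user1 user2 out) := by unfold Spec_getMutuals; infer_instance

-- ===== CLAIM (what is proved, stated in full; the proofs are below) =====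
def Claim_equal_getMutuals : Prop := ∀ (friends : List (String × List String)) (user1 : String) (user2 : String), Dom_getMutuals friends user1 user2 → Spec_getMutuals friends user1 user2 (getMutuals friends user1 user2)

-- ===== LEMMAS AND PROOFS =====

-- the loop accumulator is only ever appended to
theorem pvMergeLoop_acc : ∀ (xs ys acc : List String), pvMergeLoop xs ys acc = acc ++ pvMergeLoop xs ys []
  | x :: xs, y :: ys, acc => by
    by_cases h : x < y
    · rw [pvMergeLoop, if_pos h, pvMergeLoop_acc xs (y :: ys) acc]
      conv_rhs => rw [pvMergeLoop, if_pos h]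
    · by_cases h2 : y < x
      · rw [pvMergeLoop, if_neg h, if_pos h2, pvMergeLoop_acc (x :: xs) ys acc]
        conv_rhs => rw [pvMergeLoop, if_neg h, if_pos h2]
      · rw [pvMergeLoop, if_neg h, if_neg h2, pvMergeLoop_acc xs ys (acc ++ [y])]
        conv_rhs => rw [pvMergeLoop, if_neg h, if_neg h2, pvMergeLoop_acc xs ys ([] ++ [y])]
        simp
  | [], ys, acc => by simp [pvMergeLoop]
  | x :: xs, [], acc => by simp [pvMergeLoop]
  termination_by xs ys _ => xs.length + ys.length

-- the merged result is a subsequence of the second sorted list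
theorem pvMergeLoop_sublist : ∀ (xs ys : List String), List.Sublist (pvMergeLoop xs ys []) ys
  | x :: xs, y :: ys => by
    by_cases h : x < y
    · rw [pvMergeLoop, if_pos h]; exact pvMergeLoop_sublist xs (y :: ys)
    · by_cases h2 : y < x
      · rw [pvMergeLoop, if_neg h, if_pos h2]; exact (pvMergeLoop_sublist (x :: xs) ys).cons y
      · rw [pvMergeLoop, if_neg h, if_neg h2, pvMergeLoop_acc]
        simpa using (pvMergeLoop_sublist xs ys).cons₂ y
  | [], ys => by simp [pvMergeLoop]
  | x :: xs, [] => by simp [pvMergeLoop]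
  termination_by xs ys => xs.length + ys.length

-- on sorted inputs the merge computes the multiset-intersection counts
theorem pvMergeLoop_count : ∀ (xs ys : List String), xs.Pairwise (· ≤ ·) → ys.Pairwise (· ≤ ·) →
    ∀ v : String, (pvMergeLoop xs ys []).count v = min (xs.count v) (ys.count v)
  | x :: xs, y :: ys, hx, hy, v => by
    by_cases h : x < y
    · rw [pvMergeLoop, if_pos h, pvMergeLoop_count xs (y :: ys) hx.of_cons hy v]
      by_cases hv : v = x
      · subst hv
        have h0 : (y :: ys).count v = 0 := by
          rw [List.count_eq_zero]
          intro hm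
          rcases List.mem_cons.mp hm with rfl | hm
          · exact absurd h (lt_irrefl _)
          · exact absurd (lt_of_lt_of_le h (List.rel_of_pairwise_cons hy hm)) (lt_irrefl _)
        simp [h0]
      · have hxv : x ≠ v := fun e => hv e.symm
        simp [List.count_cons, hxv]
    · by_cases h2 : y < x
      · rw [pvMergeLoop, if_neg h, if_pos h2, pvMergeLoop_count (x :: xs) ys hx hy.of_cons v]
        by_cases hv : v = y
        · subst hv
          have h0 : (x :: xs).count v = 0 := by
            rw [List.count_eq_zero]
            intro hm
            rcases List.mem_cons.mp hm with rfl | hm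
            · exact absurd h2 (lt_irrefl _)
            · exact absurd (lt_of_lt_of_le h2 (List.rel_of_pairwise_cons hx hm)) (lt_irrefl _)
          simp [h0]
        · have hyv : y ≠ v := fun e => hv e.symm
          simp [List.count_cons, hyv]
      · have hxy : x = y := le_antisymm (not_lt.mp h2) (not_lt.mp h)
        subst hxy
        rw [pvMergeLoop, if_neg h, if_neg h2, pvMergeLoop_acc,
          List.count_append, pvMergeLoop_count xs ys hx.of_cons hy.of_cons v]
        by_cases hv : v = x
        · subst hv; simp; omega
        · have hxv : x ≠ v := fun e => hv e.symm
          simp [hxv]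
  | [], ys, _, _, v => by simp [pvMergeLoop]
  | x :: xs, [], _, _, v => by simp [pvMergeLoop]
  termination_by xs ys => xs.length + ys.length

-- a 0/if-sum over a duplicate-free list picks out the one matching key
theorem pvSum_ite_nodup (S : List String) (h : S.Nodup) (f : String → Nat) (v : String) :
    (S.map (fun k => if k = v then f k else 0)).sum = if v ∈ S then f v else 0 := by
  induction S with
  | nil => simp
  | cons a S ih =>
    simp only [List.map_cons, List.sum_cons, ih h.of_cons, List.mem_cons]
    by_cases hv : a = v
    · subst hv
      simp [(List.nodup_cons.mp h).1]
    · have hva : ¬ v = a := fun e => hv e.symm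
      simp [hv, hva]

-- B's pre-sort list has the multiset-intersection counts as well
theorem pvOut_count (l1 l2 : List String) (v : String) :
    (((pvCounts l1).items.foldl
      (fun acc kv => acc ++ List.replicate (min kv.2 ((pvCounts l2).getD kv.1 0)).toNat kv.1) [])).count v
      = min (l1.count v) (l2.count v) := by
  have hc : ∀ l : List String, pvCounts l = PySem.Dict.counter l :=
    fun l => PySem.Dict.foldl_insert_getD_add_one_eq_counter l
  rw [hc, hc, PySem.List.foldl_append_eq_flatMap, PySem.Dict.items_counter]
  rw [List.nil_append, List.count_flatMap, List.map_map]
  have he : ((List.count v ∘ fun kv : String × Int =>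
        List.replicate (min kv.2 ((PySem.Dict.counter l2).getD kv.1 0)).toNat kv.1) ∘
        fun k => (k, (l1.count k : Int)))
      = fun k => if k = v then (min ((l1.count k : Int)) ((l2.count k : Int))).toNat else 0 := by
    funext k
    by_cases hk : k = v <;>
      simp [List.count_replicate, PySem.Dict.getD_counter, hk, Function.comp]
  rw [he, pvSum_ite_nodup _ (PySem.Set.nodup_ofList l1)]
  by_cases hv : v ∈ l1
  · simp [PySem.Set.mem_ofList, hv]
    omega
  · have h0 : l1.count v = 0 := List.count_eq_zero_of_not_mem hv
    simp [PySem.Set.mem_ofList, hv, h0]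

-- the two bodies agree once both friend lists are found
theorem pvBodies_eq (l1 l2 : List String) :
    (let user1_friends := PySem.List.sorted l1 (fun x => x) false
     let user2_friends := PySem.List.sorted l2 (fun x => x) false
     let mutual_friends := pvMergeLoop user1_friends user2_friends []
     if mutual_friends.length ≠ 0 then mutual_friends else [])
    = PySem.List.sorted
        ((pvCounts l1).items.foldl
          (fun acc kv => acc ++ List.replicate (min kv.2 ((pvCounts l2).getD kv.1 0)).toNat kv.1) [])
        (fun x => x) false := by
  simp only []
  set u1 := PySem.List.sorted l1 (fun x => x) false with hu1
  set u2 := PySem.List.sorted l2 (fun x => x) false with hu2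
  set m := pvMergeLoop u1 u2 [] with hm
  set out := (pvCounts l1).items.foldl
      (fun acc kv => acc ++ List.replicate (min kv.2 ((pvCounts l2).getD kv.1 0)).toNat kv.1) [] with hout
  have hif : (if m.length ≠ 0 then m else []) = m := by
    by_cases h : m.length = 0
    · simp [List.length_eq_zero_iff.mp h]
    · simp [h]
  rw [hif]
  have hp1 : u1.Pairwise (· ≤ ·) := PySem.List.sorted_pairwise l1 (fun x => x)
  have hp2 : u2.Pairwise (· ≤ ·) := PySem.List.sorted_pairwise l2 (fun x => x)
  have hpair : m.Pairwise (· ≤ ·) := hp2.sublist (pvMergeLoop_sublist u1 u2)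
  have hperm : m.Perm out := by
    rw [List.perm_iff_count]
    intro v
    rw [hm, pvMergeLoop_count u1 u2 hp1 hp2 v, hout, pvOut_count,
      hu1, (PySem.List.sorted_perm l1 (fun x => x) false).count_eq,
      hu2, (PySem.List.sorted_perm l2 (fun x => x) false).count_eq]
  exact (PySem.List.sorted_id_eq_of_perm_of_pairwise _ _ hperm hpair).symm

-- ===== VERDICT (by name: the statement is the Claim_ definition above) =====
theorem getMutuals_spec : Claim_equal_getMutuals := by
  intro friends user1 user2 _
  unfold Spec_getMutuals getMutuals getMutuals_alt
  cases friends.lookup user1 <;> cases friends.lookup user2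
  · rfl
  · rfl
  · rfl
  · exact pvBodies_eq _ _
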